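-- pv_equiv track=rewrite | github.com/ethanliaw16/code-advent-2024 | day-8.py | projected_points
-- ===== SOURCE A (Python) =====
-- def projected_points(points):
--     point1 = points[0]
--     point2 = points[1]
--     cheb_distance = max(abs(point1[0] - point2[0]),abs(point1[1] - point2[1]))
--
--     direction_1_diff = [point1[0] - point2[0], point1[1] - point2[1]]
--     direction_2_diff = [point2[0] - point1[0], point2[1] - point1[1]]
--
--     num_to_project = int(60 / cheb_distance) + 1
--
--     current1 = point1
--     current2 = point2
--     result = [point1, point2]
--     for i in range(num_to_project):
--         current1 = project_point(current1, direction_1_diff)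
--         current2 = project_point(current2, direction_2_diff)
--         result.append(current1)
--         result.append(current2)
--     return result
--
-- def project_point(point, diff):
--     return[point[0] + diff[0], point[1] + diff[1]]
-- ===== SOURCE B (Python) =====
-- def projected_points(points):
--     point1 = points[0]
--     point2 = points[1]
--     dx = point1[0] - point2[0]
--     dy = point1[1] - point2[1]
--     cheb_distance = max(abs(dx), abs(dy))
--     num_to_project = int(60 / cheb_distance) + 1
--     result = [point1, point2]
--     for i in range(1, num_to_project + 1):
--         result.append([point1[0] + i * dx, point1[1] + i * dy])
--         result.append([point2[0] - i * dx, point2[1] - i * dy])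
--     return result
-- ===== Notes on version B (the rewrite author's own statement) =====
-- stated objective: alternative
-- what changed: Replaces A's stateful accumulation (current1/current2 threaded through project_point each iteration) by a closed-form computation: each projected point is obtained directly as point + i*diff by multiplying the step index, so no running point state is maintained.
import Mathlib
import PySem

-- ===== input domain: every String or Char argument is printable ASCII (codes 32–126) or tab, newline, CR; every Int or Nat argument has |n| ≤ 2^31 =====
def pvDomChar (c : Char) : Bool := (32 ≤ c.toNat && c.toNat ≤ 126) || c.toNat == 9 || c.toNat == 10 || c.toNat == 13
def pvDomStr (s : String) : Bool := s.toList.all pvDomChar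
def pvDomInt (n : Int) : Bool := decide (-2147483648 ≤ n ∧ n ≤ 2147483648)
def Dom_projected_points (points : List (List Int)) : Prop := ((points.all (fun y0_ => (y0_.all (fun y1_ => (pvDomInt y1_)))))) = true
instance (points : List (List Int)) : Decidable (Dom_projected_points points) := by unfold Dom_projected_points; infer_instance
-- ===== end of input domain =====

-- B drops A's running-point state: each projected point is computed in closed form as point + i*diff.
-- 'int(60 / cheb_distance)' is ported as floor division: exact on this domain, since cheb_distance ≥ 1
-- and ≤ 2^33, so the float quotient 60/cheb truncates to exactly 60 // cheb.

-- ===== PORT A =====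
def project_point (point : List Int) (diff : List Int) : List Int :=
  [PySem.List.pyGetD point 0 0 + PySem.List.pyGetD diff 0 0,
   PySem.List.pyGetD point 1 0 + PySem.List.pyGetD diff 1 0]

def projected_points (points : List (List Int)) : List (List Int) :=
  let point1 := PySem.List.pyGetD points 0 []
  let point2 := PySem.List.pyGetD points 1 []
  let cheb_distance : Int :=
    max |PySem.List.pyGetD point1 0 0 - PySem.List.pyGetD point2 0 0|
        |PySem.List.pyGetD point1 1 0 - PySem.List.pyGetD point2 1 0|
  let direction_1_diff := [PySem.List.pyGetD point1 0 0 - PySem.List.pyGetD point2 0 0,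
                           PySem.List.pyGetD point1 1 0 - PySem.List.pyGetD point2 1 0]
  let direction_2_diff := [PySem.List.pyGetD point2 0 0 - PySem.List.pyGetD point1 0 0,
                           PySem.List.pyGetD point2 1 0 - PySem.List.pyGetD point1 1 0]
  let num_to_project := PySem.Int.floordiv 60 cheb_distance + 1
  let st := (PySem.List.pyRange 0 num_to_project 1).foldl
      (fun (st : List Int × List Int × List (List Int)) _ =>
        let c1 := project_point st.1 direction_1_diff
        let c2 := project_point st.2.1 direction_2_diff
        (c1, c2, (st.2.2 ++ [c1]) ++ [c2]))
      (point1, point2, [point1, point2])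
  st.2.2

-- ===== PORT B =====
def projected_points_alt (points : List (List Int)) : List (List Int) :=
  let point1 := PySem.List.pyGetD points 0 []
  let point2 := PySem.List.pyGetD points 1 []
  let dx := PySem.List.pyGetD point1 0 0 - PySem.List.pyGetD point2 0 0
  let dy := PySem.List.pyGetD point1 1 0 - PySem.List.pyGetD point2 1 0
  let cheb_distance : Int := max |dx| |dy|
  let num_to_project := PySem.Int.floordiv 60 cheb_distance + 1
  (PySem.List.pyRange 1 (num_to_project + 1) 1).foldl
    (fun res i =>
      res ++ [[PySem.List.pyGetD point1 0 0 + i * dx, PySem.List.pyGetD point1 1 0 + i * dy],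
              [PySem.List.pyGetD point2 0 0 - i * dx, PySem.List.pyGetD point2 1 0 - i * dy]])
    [point1, point2]

-- ===== PRECONDITION & SPEC =====
-- Pre_ excludes exactly the inputs on which A raises: fewer than two points or a point with fewer
-- than two coordinates (IndexError), and equal first-two-coordinates (ZeroDivisionError on 60/0).
def Pre_projected_points (points : List (List Int)) : Prop :=
  2 ≤ points.length ∧
  2 ≤ (points.getD 0 []).length ∧ 2 ≤ (points.getD 1 []).length ∧
  ((points.getD 0 []).getD 0 0 ≠ (points.getD 1 []).getD 0 0 ∨
   (points.getD 0 []).getD 1 0 ≠ (points.getD 1 []).getD 1 0)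
instance (points : List (List Int)) : Decidable (Pre_projected_points points) := by
  unfold Pre_projected_points; infer_instance

def pvWitness_projected_points : List (List Int) := [[0, 0], [1, 1]]

def Spec_projected_points (points : List (List Int)) (out : List (List Int)) : Prop := out = projected_points_alt points
instance (points : List (List Int)) (out : List (List Int)) : Decidable (Spec_projected_points points out) := by unfold Spec_projected_points; infer_instance

-- ===== CLAIM (what is proved, stated in full; the proofs are below) =====
def Claim_equal_projected_points : Prop := ∀ (points : List (List Int)), Dom_projected_points points → Pre_projected_points points → Spec_projected_points points (projected_points points)

-- ===== LEMMAS AND PROOFS =====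

-- closed form of A's loop: after k+1 steps the running points are start + (k+1)*diff
lemma loopA_closed (dx dy du dv : Int) :
    ∀ (n : Nat) (c1 c2 : List Int) (x y u v : Int) (acc : List (List Int)),
    c1.getD 0 0 = x → c1.getD 1 0 = y →
    c2.getD 0 0 = u → c2.getD 1 0 = v →
    ((List.range n).foldl
        (fun (st : List Int × List Int × List (List Int)) _ =>
          let a := project_point st.1 [dx, dy]
          let b := project_point st.2.1 [du, dv]
          (a, b, (st.2.2 ++ [a]) ++ [b]))
        (c1, c2, acc)).2.2
    = acc ++ (List.range n).flatMap (fun (k : Nat) =>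
        [[x + ((k : Int) + 1) * dx, y + ((k : Int) + 1) * dy],
         [u + ((k : Int) + 1) * du, v + ((k : Int) + 1) * dv]]) := by
  intro n
  induction n with
  | zero => intro c1 c2 x y u v acc _ _ _ _; simp
  | succ n ih =>
    intro c1 c2 x y u v acc hx hy hu hv
    rw [List.range_succ_eq_map, List.foldl_cons, List.foldl_map]
    have hinit : (let a := project_point (c1, c2, acc).1 [dx, dy]
          let b := project_point (c1, c2, acc).2.1 [du, dv]
          ((a, b, ((c1, c2, acc).2.2 ++ [a]) ++ [b]) : List Int × List Int × List (List Int)))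
        = ([x + dx, y + dy], [u + du, v + dv],
           (acc ++ [[x + dx, y + dy]]) ++ [[u + du, v + dv]]) := by
      simp only [project_point, PySem.List.pyGetD_zero]
      rw [show ((1 : Int)) = ((1 : Nat) : Int) from rfl]
      simp only [PySem.List.pyGetD_natCast, List.getD_cons_succ, List.getD_cons_zero,
        hx, hy, hu, hv]
    rw [hinit]
    rw [ih [x + dx, y + dy] [u + du, v + dv] (x + dx) (y + dy) (u + du) (v + dv)
        ((acc ++ [[x + dx, y + dy]]) ++ [[u + du, v + dv]])
        rfl rfl rfl rfl]
    rw [List.flatMap_cons, List.flatMap_map]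
    simp only [List.append_assoc, List.cons_append, List.nil_append, Nat.cast_zero,
      zero_add, one_mul]
    congr 1
    congr 1
    congr 1
    congr 1
    funext k
    push_cast; ring_nf

theorem projected_points_spec : Claim_equal_projected_points := by
  intro points _ hpre
  obtain ⟨hlen, -, -, -⟩ := hpre
  match points, hlen with
  | p1 :: p2 :: rest, _ =>
    show projected_points _ = projected_points_alt _
    have g0 : PySem.List.pyGetD (p1 :: p2 :: rest) 0 [] = p1 := by simp [pysem]
    have g1 : PySem.List.pyGetD (p1 :: p2 :: rest) 1 [] = p2 := by simp [pysem]
    simp only [projected_points, projected_points_alt, g0, g1]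
    generalize PySem.Int.floordiv 60
      (max |PySem.List.pyGetD p1 0 0 - PySem.List.pyGetD p2 0 0|
           |PySem.List.pyGetD p1 1 0 - PySem.List.pyGetD p2 1 0|) = m
    rw [PySem.List.pyRange_one 0 (m + 1), PySem.List.pyRange_one 1 (m + 1 + 1)]
    rw [show (m + 1 - 0).toNat = (m + 1).toNat by omega,
        show (m + 1 + 1 - 1).toNat = (m + 1).toNat by omega]
    rw [List.foldl_map, List.foldl_map]
    rw [loopA_closed _ _ _ _ _ p1 p2 _ _ _ _ _
        (PySem.List.pyGetD_zero p1 0).symm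
        (show p1.getD 1 0 = PySem.List.pyGetD p1 1 0 from by
          rw [show ((1 : Int)) = ((1 : Nat) : Int) from rfl, PySem.List.pyGetD_natCast])
        (PySem.List.pyGetD_zero p2 0).symm
        (show p2.getD 1 0 = PySem.List.pyGetD p2 1 0 from by
          rw [show ((1 : Int)) = ((1 : Nat) : Int) from rfl, PySem.List.pyGetD_natCast])]
    rw [PySem.List.foldl_append_eq_flatMap]
    congr 1
    congr 1
    funext k
    ring_nf

-- ===== VERDICT (by name: the statement is the Claim_ definition above) =====
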